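-- pv_equiv track=rewrite | github.com/youngz0/word150 | dim_utils_v3_1.py | unload_data
-- ===== SOURCE A (Python) =====
-- def unload_data(p_dim_d_):
--     k_l = []
--     v_l = []
--     for i, e in enumerate(p_dim_d_):
--         if i%2==0:
--             k_l.append(e)
--         else:
--             v_l.append(e)
--     return k_l,v_l
-- ===== SOURCE B (Python) =====
-- def unload_data(p_dim_d_):
--     lst = list(p_dim_d_)
--     return lst[::2], lst[1::2]
-- ===== Notes on version B (the rewrite author's own statement) =====
-- stated objective: idiomatic
-- what changed: Replaces the single interleaved enumerate loop with a per-index parity branch by two strided slices lst[::2] and lst[1::2]; no index or parity test remains.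
import Mathlib
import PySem

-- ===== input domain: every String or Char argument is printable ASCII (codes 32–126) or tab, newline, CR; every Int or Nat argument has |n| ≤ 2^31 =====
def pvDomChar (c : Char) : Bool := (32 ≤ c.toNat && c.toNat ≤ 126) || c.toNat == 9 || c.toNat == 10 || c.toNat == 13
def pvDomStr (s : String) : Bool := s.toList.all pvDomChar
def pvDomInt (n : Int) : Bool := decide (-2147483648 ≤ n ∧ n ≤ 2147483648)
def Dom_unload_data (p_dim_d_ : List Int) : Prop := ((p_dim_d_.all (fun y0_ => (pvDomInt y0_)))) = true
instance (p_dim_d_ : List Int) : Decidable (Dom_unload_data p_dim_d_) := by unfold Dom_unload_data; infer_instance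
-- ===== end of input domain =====

-- B replaces the interleaved parity-branching loop with two strided slices; same cost, more idiomatic.

-- ===== PORT A =====
-- enumerate loop appending to k_l on even index, v_l on odd index
def unload_data (p_dim_d_ : List Int) : List Int × List Int :=
  (PySem.List.enumerate p_dim_d_).foldl
    (fun (acc : List Int × List Int) (ie : Int × Int) =>
      if PySem.Int.mod ie.1 2 = 0 then (acc.1 ++ [ie.2], acc.2)
      else (acc.1, acc.2 ++ [ie.2]))
    ([], [])

-- ===== PORT B =====
-- lst[::2] and lst[1::2]; step 2 ≠ 0 so slice? is always `some`, the default [] is never used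
def unload_data_alt (p_dim_d_ : List Int) : List Int × List Int :=
  ((PySem.List.slice? p_dim_d_ none none 2).getD [],
   (PySem.List.slice? p_dim_d_ (some 1) none 2).getD [])

-- ===== PRECONDITION & SPEC =====
def Spec_unload_data (p_dim_d_ : List Int) (out : List Int × List Int) : Prop := out = unload_data_alt p_dim_d_
instance (p_dim_d_ : List Int) (out : List Int × List Int) : Decidable (Spec_unload_data p_dim_d_ out) := by unfold Spec_unload_data; infer_instance

-- ===== CLAIM (what is proved, stated in full; the proofs are below) =====
def Claim_equal_unload_data : Prop := ∀ (p_dim_d_ : List Int), Dom_unload_data p_dim_d_ → Spec_unload_data p_dim_d_ (unload_data p_dim_d_)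

-- ===== LEMMAS AND PROOFS =====

mutual
def pvEvens : List Int → List Int
  | [] => []
  | x :: xs => x :: pvOdds xs
def pvOdds : List Int → List Int
  | [] => []
  | _ :: xs => pvEvens xs
end

lemma pv_foldA (xs : List Int) (s : Int) (k v : List Int) (hs : 0 ≤ s) :
    (PySem.List.enumerate xs s).foldl
      (fun (acc : List Int × List Int) (ie : Int × Int) =>
        if PySem.Int.mod ie.1 2 = 0 then (acc.1 ++ [ie.2], acc.2)
        else (acc.1, acc.2 ++ [ie.2]))
      (k, v) =
      if PySem.Int.mod s 2 = 0 then (k ++ pvEvens xs, v ++ pvOdds xs)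
      else (k ++ pvOdds xs, v ++ pvEvens xs) := by
  induction xs generalizing s k v with
  | nil => simp [PySem.List.enumerate, pvEvens, pvOdds]
  | cons x xs ih =>
    rw [PySem.List.enumerate_cons, List.foldl_cons]
    have hs1 : 0 ≤ s + 1 := by omega
    by_cases h : PySem.Int.mod s 2 = 0
    · have h1 : PySem.Int.mod (s + 1) 2 ≠ 0 := by
        simp only [PySem.Int.mod, Int.fmod_eq_emod] at h ⊢
        omega
      simp only [if_pos h]
      rw [ih (s+1) _ _ hs1, if_neg h1]
      simp [pvEvens, pvOdds]
    · have h1 : PySem.Int.mod (s + 1) 2 = 0 := by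
        simp only [PySem.Int.mod, Int.fmod_eq_emod] at h ⊢
        omega
      simp only [if_neg h]
      rw [ih (s+1) _ _ hs1, if_pos h1]
      simp [pvEvens, pvOdds]

lemma pv_filt_evens (xs : List Int) :
    (List.range ((xs.length + 1) / 2)).filterMap (fun k => xs[2 * k]?) = pvEvens xs := by
  match xs with
  | [] => simp [pvEvens]
  | [a] => simp [pvEvens, pvOdds, List.range_succ]
  | a :: b :: xs =>
    have ih := pv_filt_evens xs
    have hlen : (((a :: b :: xs).length + 1) / 2) = (xs.length + 1) / 2 + 1 := by
      simp [List.length_cons]; omega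
    rw [hlen, List.range_succ_eq_map, List.filterMap_cons, List.filterMap_map]
    have : (fun k => (a :: b :: xs)[2 * (k + 1)]?) = (fun k => xs[2 * k]?) := by
      funext k
      rw [show 2 * (k + 1) = 2 * k + 1 + 1 by ring]
      simp
    simp only [Function.comp_def, Nat.succ_eq_add_one, this, ih]
    simp [pvEvens, pvOdds]
termination_by xs.length

lemma pv_filt_odds (xs : List Int) :
    (List.range (xs.length / 2)).filterMap (fun k => xs[2 * k + 1]?) = pvOdds xs := by
  match xs with
  | [] => simp [pvOdds]
  | [a] => simp [pvOdds, pvEvens]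
  | a :: b :: xs =>
    have ih := pv_filt_odds xs
    have hlen : ((a :: b :: xs).length / 2) = xs.length / 2 + 1 := by
      simp [List.length_cons]; omega
    rw [hlen, List.range_succ_eq_map, List.filterMap_cons, List.filterMap_map]
    have : (fun k => (a :: b :: xs)[2 * (k + 1) + 1]?) = (fun k => xs[2 * k + 1]?) := by
      funext k
      rw [show 2 * (k + 1) + 1 = 2 * k + 1 + 1 + 1 by ring]
      simp
    simp only [Function.comp_def, Nat.succ_eq_add_one, this, ih]
    simp [pvOdds, pvEvens]
termination_by xs.length

lemma pv_sliceE (xs : List Int) :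
    PySem.List.slice? xs none none 2 = some (pvEvens xs) := by
  rw [← pv_filt_evens, PySem.List.slice?]
  simp only [PySem.List.sliceIndices]
  norm_num
  have hc : (if 0 < xs.length then (((xs.length : Int) + 2 - 1) / 2).toNat else 0)
      = (xs.length + 1) / 2 := by
    split <;> omega
  rw [hc]
  have harg : ∀ k : Nat, ((2:Int) * (k:Int)).toNat = 2 * k := by intro k; omega
  simp only [harg]

lemma pv_sliceO (xs : List Int) :
    PySem.List.slice? xs (some 1) none 2 = some (pvOdds xs) := by
  rw [← pv_filt_odds, PySem.List.slice?]
  simp only [PySem.List.sliceIndices]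
  norm_num
  rcases xs with _ | ⟨x, t⟩
  · norm_num [pvOdds]
  · have hmin : min (1:Int) ((x :: t).length : Int) = 1 := by simp
    rw [hmin]
    have harg : (fun k : Nat => (x :: t)[((1:Int) + 2 * (k:Int)).toNat]?)
        = fun k => (x :: t)[2 * k + 1]? := by
      funext k; congr 1; omega
    rw [harg]
    congr 2
    split <;> omega

-- ===== VERDICT (by name: the statement is the Claim_ definition above) =====
theorem unload_data_spec : Claim_equal_unload_data := by
  intro xs _
  unfold Spec_unload_data unload_data unload_data_alt
  rw [pv_sliceE, pv_sliceO, pv_foldA xs 0 [] [] (le_refl 0)]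
  simp [PySem.Int.mod]
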